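-- pv_equiv track=rewrite | github.com/Halo123188/PokerBot2025 | python_skeleton/abstraction.py | get_postflop_action_id
-- ===== SOURCE A (Python) =====
-- def get_postflop_action_id(actions, player, pot):
--     action_id = ""
--     small_blind_bet = 0
--     big_blind_bet = 0
--
--     prebet = ""
--     abstracted_bet = ""
--     postbet = ""
--     small_blind_abstracted = ""
--     big_blind_abstracted = ""
--
--     start_bet = False
--     for i in range(len(actions)):
--       action = actions[i]
--       if start_bet == False and (action == "c" or action == "f" or action == "k"):
--         prebet += action
--       if start_bet == True and (action == "c" or action == "f" or action == "k"):
--         postbet += action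
--       if action[0] == "b":
--         start_bet = True
--         if i % 2 == 0:
--           small_blind_bet += int(action[1:])
--         else:
--           big_blind_bet += int(action[1:])
--
--     if small_blind_bet == 0:
--       pass
--     elif small_blind_bet <= pot:
--       small_blind_abstracted = "bmin"
--     else:
--       small_blind_abstracted = "bmax"
--
--     if big_blind_bet == 0:
--       pass
--     elif big_blind_bet <= pot:
--       big_blind_abstracted = "bmin"
--     else:
--       big_blind_abstracted = "bmax"
--
--     if player == 0:
--       abstracted_bet = small_blind_abstracted + big_blind_abstracted
--     else:
--       abstracted_bet = big_blind_abstracted + small_blind_abstracted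
--
--     action_id = prebet + abstracted_bet + postbet
--
--     return action_id
-- ===== SOURCE B (Python) =====
-- def get_postflop_action_id(actions, player, pot):
--     # single backward pass: walk the actions from last to first; letters collected
--     # so far sit in `pre` until a bet is seen behind them, at which point they are
--     # flushed into `post` (everything after the first bet ends up in post).
--     pre = ""
--     post = ""
--     sb = 0
--     bb = 0
--     for i in range(len(actions) - 1, -1, -1):
--         a = actions[i]
--         if a[0] == "b":
--             post = pre + post
--             pre = ""
--             if i % 2 == 0:
--                 sb += int(a[1:])
--             else:
--                 bb += int(a[1:])
--         elif a in ("c", "f", "k"):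
--             pre = a + pre
--
--     def bucket(bet):
--         return "" if bet == 0 else ("bmin" if bet <= pot else "bmax")
--
--     mid = bucket(sb) + bucket(bb) if player == 0 else bucket(bb) + bucket(sb)
--     return pre + mid + post
-- ===== Notes on version B (the rewrite author's own statement) =====
-- stated objective: alternative
-- what changed: Replaces A's forward loop with a start_bet flag and two separate letter accumulators by a single backward traversal that keeps one pending letter buffer and flushes it into the post-bet part whenever a bet is encountered behind it, so no flag or boundary is ever tracked.
import Mathlib
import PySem

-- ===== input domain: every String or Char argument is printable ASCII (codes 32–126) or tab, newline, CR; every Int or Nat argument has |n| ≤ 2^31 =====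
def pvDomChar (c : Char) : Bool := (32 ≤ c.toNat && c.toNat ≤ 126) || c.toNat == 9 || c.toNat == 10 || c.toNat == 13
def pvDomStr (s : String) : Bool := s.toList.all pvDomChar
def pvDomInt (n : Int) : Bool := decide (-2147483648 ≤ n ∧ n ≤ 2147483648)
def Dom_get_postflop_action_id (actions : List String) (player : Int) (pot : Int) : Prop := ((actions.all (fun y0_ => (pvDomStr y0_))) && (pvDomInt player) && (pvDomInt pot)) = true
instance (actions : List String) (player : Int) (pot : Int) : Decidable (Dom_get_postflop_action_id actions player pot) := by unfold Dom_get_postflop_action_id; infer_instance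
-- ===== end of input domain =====

-- B replaces A's forward flag loop by a single backward pass with one pending letter
-- buffer flushed into the post-bet part at each bet (alternative decomposition, same cost).

-- ===== PORT A =====
-- A's loop body (two flag-guarded concletters, then the bet branch), as one step
-- function over the state (prebet, postbet, small_blind_bet, big_blind_bet, start_bet);
-- strings are handled as List Char (Python '+=' on str = list append), packed at the end.
def pvStepA (st : List Char × List Char × Int × Int × Bool) (ia : Int × List Char) :
    List Char × List Char × Int × Int × Bool :=
  match st, ia with
  | (prebet, postbet, sb, bb, start_bet), (i, action) =>
    let prebet := if start_bet = false ∧ (action = ['c'] ∨ action = ['f'] ∨ action = ['k'])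
      then prebet ++ action else prebet
    let postbet := if start_bet = true ∧ (action = ['c'] ∨ action = ['f'] ∨ action = ['k'])
      then postbet ++ action else postbet
    if PySem.List.pyGet? action 0 = some 'b' then
      -- int(action[1:]): Pre_ guarantees the parse succeeds; .getD 0 is never the raising case there
      if PySem.Int.mod i 2 = 0 then
        (prebet, postbet, sb + (PySem.Int.ofChars? (PySem.List.slice action (some 1) none)).getD 0, bb, true)
      else
        (prebet, postbet, sb, bb + (PySem.Int.ofChars? (PySem.List.slice action (some 1) none)).getD 0, true)
    else (prebet, postbet, sb, bb, start_bet)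

def get_postflop_action_id (actions : List String) (player : Int) (pot : Int) : String :=
  let acts := actions.map String.toList
  let st := (PySem.List.pyRange 0 (acts.length : Int) 1).foldl
      (fun st i => pvStepA st (i, PySem.List.pyGetD acts i [])) ([], [], 0, 0, false)
  match st with
  | (prebet, postbet, small_blind_bet, big_blind_bet, _) =>
    let small_blind_abstracted : List Char :=
      if small_blind_bet = 0 then []
      else if small_blind_bet ≤ pot then ['b','m','i','n'] else ['b','m','a','x']
    let big_blind_abstracted : List Char :=
      if big_blind_bet = 0 then []
      else if big_blind_bet ≤ pot then ['b','m','i','n'] else ['b','m','a','x']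
    let abstracted_bet := if player = 0 then small_blind_abstracted ++ big_blind_abstracted
      else big_blind_abstracted ++ small_blind_abstracted
    String.ofList (prebet ++ abstracted_bet ++ postbet)

-- ===== PORT B =====
-- B's backward loop body over the state (pre, post, sb, bb)
def pvStepB (st : List Char × List Char × Int × Int) (ia : Int × List Char) :
    List Char × List Char × Int × Int :=
  match st, ia with
  | (pre, post, sb, bb), (i, a) =>
    if PySem.List.pyGet? a 0 = some 'b' then
      if PySem.Int.mod i 2 = 0 then
        ([], pre ++ post, sb + (PySem.Int.ofChars? (PySem.List.slice a (some 1) none)).getD 0, bb)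
      else
        ([], pre ++ post, sb, bb + (PySem.Int.ofChars? (PySem.List.slice a (some 1) none)).getD 0)
    else if a = ['c'] ∨ a = ['f'] ∨ a = ['k'] then (a ++ pre, post, sb, bb)
    else (pre, post, sb, bb)

-- "" if bet == 0 else ("bmin" if bet <= pot else "bmax")
def pvBucket (pot bet : Int) : List Char :=
  if bet = 0 then [] else if bet ≤ pot then ['b','m','i','n'] else ['b','m','a','x']

def get_postflop_action_id_alt (actions : List String) (player : Int) (pot : Int) : String :=
  let acts := actions.map String.toList
  -- for i in range(len(actions) - 1, -1, -1)
  let st := (PySem.List.pyRange ((acts.length : Int) - 1) (-1) (-1)).foldl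
      (fun st i => pvStepB st (i, PySem.List.pyGetD acts i [])) ([], [], 0, 0)
  match st with
  | (pre, post, sb, bb) =>
    let mid := if player = 0 then pvBucket pot sb ++ pvBucket pot bb
      else pvBucket pot bb ++ pvBucket pot sb
    String.ofList (pre ++ mid ++ post)

-- ===== PRECONDITION & SPEC =====
-- Pre_ excludes exactly the inputs where the Python A raises: an empty action string
-- (IndexError on action[0]) or a bet action whose suffix is not int()-parsable (ValueError).
def Pre_get_postflop_action_id (actions : List String) (player : Int) (pot : Int) : Prop :=
  ∀ a ∈ actions, a.toList ≠ [] ∧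
    (a.toList.head? = some 'b' → (PySem.Int.ofChars? (a.toList.drop 1)).isSome = true)
instance (actions : List String) (player : Int) (pot : Int) :
    Decidable (Pre_get_postflop_action_id actions player pot) := by
  unfold Pre_get_postflop_action_id; infer_instance
def pvWitness_get_postflop_action_id : List String × Int × Int := (["c", "b10", "k", "b25"], 0, 20)
def Spec_get_postflop_action_id (actions : List String) (player : Int) (pot : Int) (out : String) : Prop := out = get_postflop_action_id_alt actions player pot
instance (actions : List String) (player : Int) (pot : Int) (out : String) : Decidable (Spec_get_postflop_action_id actions player pot out) := by unfold Spec_get_postflop_action_id; infer_instance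

-- ===== CLAIM (what is proved, stated in full; the proofs are below) =====
def Claim_equal_get_postflop_action_id : Prop := ∀ (actions : List String) (player : Int) (pot : Int), Dom_get_postflop_action_id actions player pot → Pre_get_postflop_action_id actions player pot → Spec_get_postflop_action_id actions player pot (get_postflop_action_id actions player pot)

-- ===== LEMMAS AND PROOFS =====
-- Both loops are characterised against the same canonical quantities:
-- the index of the first bet, the filtered letters of each side, and the parity sums.

def pvIsCfk (a : List Char) : Bool := a == ['c'] || a == ['f'] || a == ['k']

def pvBetBoundary : List (List Char) → Nat
  | [] => 0
  | a :: r => if a.head? == some 'b' then 0 else pvBetBoundary r + 1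

-- parity sum of bet amounts, enumerate starting at s
def pvPSumFrom (acts : List (List Char)) (s : Int) (r : Int) : Int :=
  (((PySem.List.enumerate acts s).filter
      (fun p => p.2.head? == some 'b' && PySem.Int.mod p.1 2 == r)).map
    (fun p => (PySem.Int.ofChars? (p.2.drop 1)).getD 0)).sum

theorem pvIsCfk_of_head_b {a : List Char} (h : a.head? = some 'b') : pvIsCfk a = false := by
  cases a with
  | nil => simp at h
  | cons c t => simp at h; subst h; simp [pvIsCfk]

-- loop invariant for A's fold, by structural induction on the actions
theorem pvLoopA_inv (acts : List (List Char)) (s : Int) (p q : List Char)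
    (sb bb : Int) (flag : Bool) :
    (PySem.List.enumerate acts s).foldl pvStepA (p, q, sb, bb, flag) =
      (p ++ (if flag then [] else ((acts.take (pvBetBoundary acts)).filter pvIsCfk).flatten),
       q ++ (if flag then (acts.filter pvIsCfk).flatten
             else ((acts.drop (pvBetBoundary acts)).filter pvIsCfk).flatten),
       sb + pvPSumFrom acts s 0, bb + pvPSumFrom acts s 1,
       flag || acts.any (fun a => a.head? == some 'b')) := by
  induction acts generalizing s p q sb bb flag with
  | nil => simp [pvPSumFrom, PySem.List.enumerate_nil, pvBetBoundary]
  | cons a rest ih =>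
    have hmod : PySem.Int.mod s 2 = 0 ∨ PySem.Int.mod s 2 = 1 := by
      have h1 := PySem.Int.mod_nonneg s (b := 2) (by omega)
      have h2 := PySem.Int.mod_lt s (b := 2) (by omega)
      omega
    rw [PySem.List.enumerate_cons]
    by_cases hb : a.head? = some 'b'
    · have hcfk : pvIsCfk a = false := pvIsCfk_of_head_b hb
      have hnc : ¬ (a = ['c'] ∨ a = ['f'] ∨ a = ['k']) := by
        rintro (rfl | rfl | rfl) <;> simp [pvIsCfk] at hcfk
      have hget : PySem.List.pyGet? a 0 = some 'b' := by
        rw [PySem.List.pyGet?_zero, ← List.head?_eq_getElem?]; exact hb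
      have hmeq : PySem.Int.mod s 2 = s % 2 := PySem.Int.mod_eq_emod_of_pos (by norm_num)
      rw [hmeq] at hmod
      rcases hmod with hm | hm
      · have hd : (2:Int) ∣ s := by omega
        cases flag <;>
          simp [List.foldl_cons, pvStepA, hget, hm, hnc, ih, pvBetBoundary, hb, hcfk,
            pvPSumFrom, PySem.List.enumerate_cons,
            PySem.List.slice_from_one, List.drop_one, add_assoc]
      · have hd : ¬ (2:Int) ∣ s := by omega
        cases flag <;>
          simp [List.foldl_cons, pvStepA, hget, hm, hnc, ih, pvBetBoundary, hb, hcfk,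
            pvPSumFrom, PySem.List.enumerate_cons,
            PySem.List.slice_from_one, List.drop_one, add_assoc]
    · have hget : ¬ PySem.List.pyGet? a 0 = some 'b' := by
        cases a with
        | nil => simp [PySem.List.pyGet?_zero]
        | cons c t => simpa [PySem.List.pyGet?_zero] using hb
      by_cases hc : a = ['c'] ∨ a = ['f'] ∨ a = ['k']
      · have hcfk : pvIsCfk a = true := by
          rcases hc with rfl | rfl | rfl <;> simp [pvIsCfk]
        cases flag <;>
          simp [List.foldl_cons, pvStepA, hget, hc, ih, pvBetBoundary, hb, hcfk,
            pvPSumFrom, PySem.List.enumerate_cons, List.take_succ_cons,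
            List.drop_succ_cons, List.append_assoc]
      · have hc' := hc
        push Not at hc'
        have hcfk : pvIsCfk a = false := by
          simp [pvIsCfk, hc'.1, hc'.2.1, hc'.2.2]
        cases flag <;>
          simp [List.foldl_cons, pvStepA, hget, hc, ih, pvBetBoundary, hb, hcfk,
            pvPSumFrom, PySem.List.enumerate_cons, List.take_succ_cons,
            List.drop_succ_cons]

-- loop invariant for B's backward fold, phrased as a foldr over the enumerate list
theorem pvLoopB_inv (acts : List (List Char)) (s : Int) :
    (PySem.List.enumerate acts s).foldr (fun ia st => pvStepB st ia) ([], [], 0, 0) =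
      (((acts.take (pvBetBoundary acts)).filter pvIsCfk).flatten,
       ((acts.drop (pvBetBoundary acts)).filter pvIsCfk).flatten,
       pvPSumFrom acts s 0, pvPSumFrom acts s 1) := by
  induction acts generalizing s with
  | nil => simp [pvPSumFrom, PySem.List.enumerate_nil, pvBetBoundary]
  | cons a rest ih =>
    have hmod : PySem.Int.mod s 2 = 0 ∨ PySem.Int.mod s 2 = 1 := by
      have h1 := PySem.Int.mod_nonneg s (b := 2) (by omega)
      have h2 := PySem.Int.mod_lt s (b := 2) (by omega)
      omega
    rw [PySem.List.enumerate_cons, List.foldr_cons, ih]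
    by_cases hb : a.head? = some 'b'
    · have hcfk : pvIsCfk a = false := pvIsCfk_of_head_b hb
      have hget : PySem.List.pyGet? a 0 = some 'b' := by
        rw [PySem.List.pyGet?_zero, ← List.head?_eq_getElem?]; exact hb
      -- flushing: pre ++ post = filter of the whole rest
      have hflush : ((rest.take (pvBetBoundary rest)).filter pvIsCfk).flatten ++
          ((rest.drop (pvBetBoundary rest)).filter pvIsCfk).flatten
          = (rest.filter pvIsCfk).flatten := by
        rw [← List.flatten_append, ← List.filter_append, List.take_append_drop]
      have hmeq : PySem.Int.mod s 2 = s % 2 := PySem.Int.mod_eq_emod_of_pos (by norm_num)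
      rw [hmeq] at hmod
      rcases hmod with hm | hm
      · have hd : (2:Int) ∣ s := by omega
        simp [pvStepB, hget, hm, pvBetBoundary, hb, hcfk, hflush,
          pvPSumFrom, PySem.List.enumerate_cons,
          PySem.List.slice_from_one, List.drop_one, Int.add_comm]
      · have hd : ¬ (2:Int) ∣ s := by omega
        simp [pvStepB, hget, hm, pvBetBoundary, hb, hcfk, hflush,
          pvPSumFrom, PySem.List.enumerate_cons,
          PySem.List.slice_from_one, List.drop_one, Int.add_comm]
    · have hget : ¬ PySem.List.pyGet? a 0 = some 'b' := by
        cases a with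
        | nil => simp [PySem.List.pyGet?_zero]
        | cons c t => simpa [PySem.List.pyGet?_zero] using hb
      by_cases hc : a = ['c'] ∨ a = ['f'] ∨ a = ['k']
      · simp [pvStepB, hget, hc, pvBetBoundary, hb,
          (by rcases hc with rfl | rfl | rfl <;> simp [pvIsCfk] : pvIsCfk a = true),
          pvPSumFrom, PySem.List.enumerate_cons, List.take_succ_cons, List.drop_succ_cons]
      · have hc' := hc
        push Not at hc'
        have hcfk : pvIsCfk a = false := by
          simp [pvIsCfk, hc'.1, hc'.2.1, hc'.2.2]
        simp [pvStepB, hget, hc, pvBetBoundary, hb, hcfk,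
          pvPSumFrom, PySem.List.enumerate_cons, List.take_succ_cons, List.drop_succ_cons]

-- B's countdown foldl equals the foldr over the enumerate list
theorem pvLoopB_as_foldr (acts : List (List Char)) :
    (PySem.List.pyRange ((acts.length : Int) - 1) (-1) (-1)).foldl
        (fun st i => pvStepB st (i, PySem.List.pyGetD acts i []))
        (([], [], 0, 0) : List Char × List Char × Int × Int)
      = (PySem.List.enumerate acts 0).foldr (fun ia st => pvStepB st ia) ([], [], 0, 0) := by
  have h : PySem.List.pyRange ((acts.length : Int) - 1) (-1) (-1)
      = (PySem.List.pyRange 0 (acts.length : Int) 1).reverse := by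
    rw [PySem.List.pyRange_neg_one_eq_reverse]; norm_num
  rw [h, List.foldl_reverse,
    PySem.List.enumerate_eq_map_pyRange acts ([] : List Char), List.foldr_map]
  simp [PySem.List.len]

-- ===== VERDICT (by name: the statement is the Claim_ definition above) =====
theorem get_postflop_action_id_spec : Claim_equal_get_postflop_action_id := by
  intro actions player pot _hdom _hpre
  unfold Spec_get_postflop_action_id get_postflop_action_id get_postflop_action_id_alt
  have hloopA := pvLoopA_inv (actions.map String.toList) 0 [] [] 0 0 false
  rw [show (PySem.List.enumerate (actions.map String.toList) 0)
        = (PySem.List.pyRange 0 (((actions.map String.toList)).length : Int) 1).map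
            (fun j => (j, PySem.List.pyGetD (actions.map String.toList) j []))
      from by simpa using PySem.List.enumerate_eq_map_pyRange (actions.map String.toList) [],
      List.foldl_map] at hloopA
  have hloopB := (pvLoopB_as_foldr (actions.map String.toList)).trans
    (pvLoopB_inv (actions.map String.toList) 0)
  simp only [hloopA, hloopB, pvBucket]
  simp
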